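-- pv_equiv track=rewrite | github.com/ylsama/leetcode | constest/vnoi/selotejp.py | solution
-- ===== SOURCE A (Python) =====
-- def solution(n, m, a):
--     cache = {}
--
--     def helper(i, j, mask=None):
--         if i == 0 and j == 0:
--             if a[i][j] == '.':
--                 return 0
--             else:
--                 return 1
--
--         if mask is not None:
--             return cache[(i, j)][mask]
--
--         last = None
--         if j > 0:
--             last = [i, j-1]
--             helper(*last)
--         elif i > 0:
--             last = (i-1, m-1)
--             helper(*last)
--
--         assert last is not None
--
--         cache[(i, j)] = []
--         for mask in range(0, 1 << m):
--             possible = []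
--
--             possible += [int(a[i][j] == "#")]
--             possible[-1] += helper(last[0], last[1], mask)
--
--             if j > 0:
--                 if (mask >> j-1) & 1 == 0 and a[i][j-1] == a[i][j] == "#":
--                     possible += [helper(last[0], last[1], mask)]
--             if i > 0:
--                 if (mask >> j) & 1 == 1 and a[i-1][j] == a[i][j] == "#":
--                     possible += [helper(last[0], last[1], mask)]
--             cache[(i, j)] += [min(possible)]
--         return min(cache[(i, j)])
--
--     helper(n-1, m-1)
--
--     return min(cache[(n-1, m-1)])
-- ===== SOURCE B (Python) =====
-- def solution(n, m, a):
--     size = 1 << m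
--     prev = None
--     for k in range(n * m):
--         i, j = divmod(k, m)
--         cell = a[i][j]
--         cur = []
--         for mask in range(size):
--             if k == 0:
--                 cur.append(0 if cell == '.' else 1)
--             else:
--                 p = prev[mask]
--                 if cell == '#':
--                     free = (j > 0 and (mask >> (j - 1)) & 1 == 0 and a[i][j - 1] == '#') or \
--                            (i > 0 and (mask >> j) & 1 == 1 and a[i - 1][j] == '#')
--                     cur.append(p if free else p + 1)
--                 else:
--                     cur.append(p)
--         prev = cur
--     return min(prev)
-- ===== Notes on version B (the rewrite author's own statement) =====
-- stated objective: alternative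
-- what changed: Replaces A's memoized recursion over a dict holding a 2^m-entry row for every cell by one bottom-up row-major loop that keeps only the previous cell's row (rolling array), collapsing the three-candidate min into one conditional add.
import Mathlib
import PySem

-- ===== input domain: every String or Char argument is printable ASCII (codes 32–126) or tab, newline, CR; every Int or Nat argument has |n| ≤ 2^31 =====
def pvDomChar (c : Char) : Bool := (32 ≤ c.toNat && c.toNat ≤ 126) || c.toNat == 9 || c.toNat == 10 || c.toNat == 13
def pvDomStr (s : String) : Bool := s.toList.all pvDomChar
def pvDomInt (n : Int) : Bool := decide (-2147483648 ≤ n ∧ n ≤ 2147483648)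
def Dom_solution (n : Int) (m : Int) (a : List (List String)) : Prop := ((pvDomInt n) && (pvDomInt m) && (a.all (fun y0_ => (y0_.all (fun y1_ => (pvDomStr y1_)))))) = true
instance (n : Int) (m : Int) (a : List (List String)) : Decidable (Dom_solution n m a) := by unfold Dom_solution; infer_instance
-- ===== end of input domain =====

-- B replaces A's memoized recursion over a dict holding a 2^m-entry row for every cell by
-- one bottom-up row-major loop that keeps only the previous cell's row (rolling array),
-- with the three-candidate min collapsed to one conditional add.

-- ===== PORT A =====

/-- `a[i][j]` — two Python indexings; `none` = IndexError (shared by both ports). -/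
def getCell (a : List (List String)) (i j : Int) : Option String :=
  (PySem.List.pyGet? a i).bind (fun row => PySem.List.pyGet? row j)

/-- `(mask >> j') & 1` for `j' ≥ 0` (both call sites guard `j' ≥ 0`; shared by both ports). -/
def maskBit (mk j' : Int) : Int := PySem.Int.band (mk >>> j'.toNat) 1

/-- The state of A's `cache` dict, keyed by `(i, j)`. -/
abbrev CacheA := PySem.Dict (Int × Int) (List Int)

/-- A's nested `helper(i, j, mask)`; `mask = none` is Python's default `None`.
`fuel` is only a structural-termination guard (never exhausted under `Pre_`).
`2 ^ m.toNat` is Python's `1 << m` (exact for `m ≥ 0`; `m < 0` raises, outside `Pre_`).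
`cache[(i,j)] += [...]` is read back with `getD _ []`: the key is always present, having
been inserted just before the loop. -/
def helperA (a : List (List String)) (m : Int) :
    Nat → Int → Int → Option Int → CacheA → Option (Int × CacheA)
  | 0, _, _, _, _ => none
  | fuel + 1, i, j, mask, cache =>
    if i = 0 ∧ j = 0 then
      (getCell a i j).map (fun c => (if c = "." then 0 else 1, cache))
    else
      match mask with
      | some mk =>
          ((cache.get? (i, j)).bind (fun row => PySem.List.pyGet? row mk)).map
            (fun v => (v, cache))
      | none =>
          (if 0 < j then some (i, j - 1) else if 0 < i then some (i - 1, m - 1) else none).bind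
            fun last =>
          (helperA a m fuel last.1 last.2 none cache).bind fun pr =>
          ((PySem.List.pyRange 0 ((2 : Int) ^ m.toNat) 1).foldl
            (fun (st : Option CacheA) mk =>
              st.bind fun cache =>
              (helperA a m fuel last.1 last.2 (some mk) cache).bind fun v0 =>
              (getCell a i j).bind fun cij =>
              let possible : List Int := [(if cij = "#" then 1 else 0) + v0.1]
              let possible := possible ++
                (if 0 < j ∧ maskBit mk (j - 1) = 0 ∧ getCell a i (j - 1) = some cij ∧ cij = "#"
                 then [v0.1] else [])
              let possible := possible ++
                (if 0 < i ∧ maskBit mk j = 1 ∧ getCell a (i - 1) j = some cij ∧ cij = "#"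
                 then [v0.1] else [])
              (PySem.List.min? possible (fun x => x)).map fun mn =>
                cache.insert (i, j) (cache.getD (i, j) [] ++ [mn]))
            (some (pr.2.insert (i, j) []))).bind fun cache =>
          (cache.get? (i, j)).bind fun row =>
          (PySem.List.min? row (fun x => x)).map fun mn => (mn, cache)

/-- Port of A. `none` anywhere (an exception in Python) yields the junk value 0, outside `Pre_`. -/
def solution (n : Int) (m : Int) (a : List (List String)) : Int :=
  (((helperA a m (n.toNat * m.toNat + 1) (n - 1) (m - 1) none PySem.Dict.empty).bind fun pr =>
    (pr.2.get? (n - 1, m - 1)).bind fun row =>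
    PySem.List.min? row (fun x => x)).getD 0)

-- ===== PORT B =====

/-- B's inner-loop body: the value of cell `(i,j)` at `mask` from the previous cell's `p`.
Out-of-range neighbour reads (impossible under `Pre_`) compare unequal instead of raising. -/
def entryB (a : List (List String)) (i j mk p : Int) : Int :=
  if getCell a i j = some "#" then
    if (0 < j ∧ maskBit mk (j - 1) = 0 ∧ getCell a i (j - 1) = some "#")
       ∨ (0 < i ∧ maskBit mk j = 1 ∧ getCell a (i - 1) j = some "#")
    then p else p + 1
  else p

/-- Port of B (Source B): one rolling row `prev` over cells `k = 0 .. n*m-1`,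
`i, j = divmod(k, m)`; the first iteration initialises the row. `2 ^ m.toNat` is
Python's `1 << m` (exact for `m ≥ 0`); `prev[mask]` and `min(prev)` on the
never-assigned `prev = None` (Python TypeError, only outside `Pre_`) yield the
junk value 0 through `Option`. -/
def solution_alt (n : Int) (m : Int) (a : List (List String)) : Int :=
  let size : Int := (2 : Int) ^ m.toNat
  let prev : Option (List Int) := none
  let prev := (PySem.List.pyRange 0 (n * m) 1).foldl
    (fun (prev : Option (List Int)) k =>
      let i := PySem.Int.floordiv k m
      let j := PySem.Int.mod k m
      some ((PySem.List.pyRange 0 size 1).map fun mk =>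
        if k = 0 then (if getCell a i j = some "." then 0 else 1)
        else entryB a i j mk ((PySem.List.pyGet? (prev.getD []) mk).getD 0)))
    prev
  (prev.bind fun p => PySem.List.min? p (fun x => x)).getD 0

-- ===== PRECONDITION & SPEC =====

/-- Exactly the inputs on which A returns: at least two cells in a positive grid whose first
`n` rows exist and have at least `m` entries (a single cell hits A's `KeyError`; `n ≤ 0`,
`m ≤ 0` hit its `assert`; missing cells raise `IndexError`). -/
def Pre_solution (n : Int) (m : Int) (a : List (List String)) : Prop :=
  1 ≤ n ∧ 1 ≤ m ∧ (2 ≤ n ∨ 2 ≤ m) ∧ n.toNat ≤ a.length ∧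
    ∀ row ∈ a.take n.toNat, m.toNat ≤ row.length
instance (n : Int) (m : Int) (a : List (List String)) : Decidable (Pre_solution n m a) := by
  unfold Pre_solution; infer_instance

def pvWitness_solution : Int × Int × List (List String) :=
  (2, 2, [[".", "#"], ["#", "#"]])

def Spec_solution (n : Int) (m : Int) (a : List (List String)) (out : Int) : Prop :=
  out = solution_alt n m a
instance (n : Int) (m : Int) (a : List (List String)) (out : Int) :
    Decidable (Spec_solution n m a out) := by unfold Spec_solution; infer_instance

-- ===== CLAIM (what is proved, stated in full; the proofs are below) =====
def Claim_equal_solution : Prop := ∀ (n : Int) (m : Int) (a : List (List String)),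
  Dom_solution n m a → Pre_solution n m a → Spec_solution n m a (solution n m a)

-- ===== LEMMAS AND PROOFS =====

-- cell arithmetic
def sz (m : Int) : Nat := 2 ^ m.toNat
def ci (m : Int) (k : Nat) : Int := ((k / m.toNat : Nat) : Int)
def cj (m : Int) (k : Nat) : Int := ((k % m.toNat : Nat) : Int)

def vecB (a : List (List String)) (m : Int) : Nat → List Int
  | 0 => List.replicate (sz m) (if getCell a 0 0 = some "." then 0 else 1)
  | k + 1 => (PySem.List.pyRange 0 ((2 : Int) ^ m.toNat) 1).map fun mk =>
      entryB a (ci m (k + 1)) (cj m (k + 1)) mk ((PySem.List.pyGet? (vecB a m k) mk).getD 0)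

lemma divmod_unique {b q r k : Nat} (hb : 0 < b) (hr : r < b) (h : k = b * q + r) :
    k / b = q ∧ k % b = r := by
  subst h
  rw [Nat.mul_add_div hb, Nat.mul_add_mod, Nat.div_eq_of_lt hr, Nat.mod_eq_of_lt hr]
  omega

lemma cell_nonzero (m : Int) (k : Nat) (hk : 1 ≤ k) : ¬ (ci m k = 0 ∧ cj m k = 0) := by
  rintro ⟨h1, h2⟩
  simp only [ci, cj, Int.natCast_eq_zero] at h1 h2
  have h := Nat.div_add_mod k m.toNat
  rw [h1, h2] at h
  omega

lemma cell_ne_succ (m : Int) (k : Nat) :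
    ((ci m (k+1) : Int), (cj m (k+1) : Int)) ≠ (ci m k, cj m k) := by
  intro h
  have h1 : ci m (k+1) = ci m k := congrArg Prod.fst h
  have h2 : cj m (k+1) = cj m k := congrArg Prod.snd h
  simp only [ci, cj, Int.natCast_inj] at h1 h2
  have ha := Nat.div_add_mod k m.toNat
  have hb := Nat.div_add_mod (k+1) m.toNat
  rw [h1, h2] at hb
  omega

lemma cell_pred_pos (m : Int) (hm : 1 ≤ m) (k : Nat) (h : 0 < cj m (k+1)) :
    ci m k = ci m (k+1) ∧ cj m k = cj m (k+1) - 1 := by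
  have hr : 0 < (k+1) % m.toNat := by
    simp only [cj] at h; exact_mod_cast h
  clear h
  have hM : 0 < m.toNat := by omega
  have hb := Nat.div_add_mod (k+1) m.toNat
  have hlt := Nat.mod_lt (k+1) hM
  have hu := divmod_unique (b := m.toNat) (q := (k+1)/m.toNat) (r := (k+1) % m.toNat - 1)
    (k := k) hM (by omega) (by omega)
  refine ⟨?_, ?_⟩
  · simp only [ci, hu.1]
  · simp only [cj, hu.2]; omega

lemma cell_pred_zero (m : Int) (hm : 1 ≤ m) (k : Nat) (h : cj m (k+1) = 0) :
    0 < ci m (k+1) ∧ ci m k = ci m (k+1) - 1 ∧ cj m k = m - 1 := by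
  have hM : 0 < m.toNat := by omega
  simp only [cj, Int.natCast_eq_zero] at h
  have hb := Nat.div_add_mod (k+1) m.toNat
  rw [h, Nat.add_zero] at hb
  have hQ : ci m (k+1) = (((k+1) / m.toNat : Nat) : Int) := rfl
  generalize hq0 : (k+1) / m.toNat = Q at hb hQ
  have hq : 0 < Q := by
    by_contra h0
    have h0' : Q = 0 := by omega
    rw [h0', Nat.mul_zero] at hb; omega
  have hms : m.toNat * (Q - 1) = m.toNat * Q - m.toNat := by
    rw [Nat.mul_sub, Nat.mul_one]
  have hge : m.toNat ≤ m.toNat * Q := Nat.le_mul_of_pos_right _ hq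
  have hu := divmod_unique (b := m.toNat) (q := Q - 1) (r := m.toNat - 1)
    (k := k) hM (by omega) (by omega)
  refine ⟨?_, ?_, ?_⟩
  · rw [hQ]; exact_mod_cast hq
  · simp only [ci, hu.1]; omega
  · simp only [cj, hu.2]; omega

lemma cell_bound (m : Int) (N : Nat) (k : Nat) (hm : 1 ≤ m) (hk : k < N * m.toNat) :
    (k / m.toNat) < N ∧ (k % m.toNat) < m.toNat := by
  have hM : 0 < m.toNat := by omega
  exact ⟨Nat.div_lt_of_lt_mul (Nat.mul_comm N m.toNat ▸ hk), Nat.mod_lt _ hM⟩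
lemma sz_cast (m : Int) : ((sz m : Nat) : Int) = (2 : Int) ^ m.toNat := by
  simp [sz]

lemma len_vecB (a : List (List String)) (m : Int) (k : Nat) :
    (vecB a m k).length = sz m := by
  cases k with
  | zero => simp [vecB, sz]
  | succ t =>
      simp only [vecB, List.length_map, PySem.List.length_pyRange_one, Int.sub_zero,
        ← sz_cast, Int.toNat_natCast]

lemma pyGet?_vecB (a : List (List String)) (m : Int) (k : Nat) (mk : Int)
    (h0 : 0 ≤ mk) (h1 : mk < (sz m : Nat)) :
    PySem.List.pyGet? (vecB a m k) mk
      = some ((PySem.List.pyGet? (vecB a m k) mk).getD 0) := by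
  rw [PySem.List.pyGet?_of_nonneg _ h0]
  have hlt : mk.toNat < (vecB a m k).length := by rw [len_vecB]; omega
  simp [List.getElem?_eq_getElem hlt]

lemma getCell_some (a : List (List String)) (n m : Int)
    (hlen : n.toNat ≤ a.length) (hrow : ∀ row ∈ a.take n.toNat, m.toNat ≤ row.length)
    (i j : Int) (hi0 : 0 ≤ i) (hi : i < n) (hj0 : 0 ≤ j) (hj : j < m) :
    ∃ s, getCell a i j = some s := by
  have hiN : i.toNat < a.length := by omega
  have hrowmem : a[i.toNat] ∈ a.take n.toNat := by
    have h1 : i.toNat < n.toNat := by omega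
    have h2 : i.toNat < (a.take n.toNat).length := by simp; omega
    have := List.getElem_take (xs := a) (h := h2)
    exact this ▸ List.getElem_mem h2
  have hlenrow : m.toNat ≤ a[i.toNat].length := hrow _ hrowmem
  have hjN : j.toNat < a[i.toNat].length := by omega
  refine ⟨a[i.toNat][j.toNat], ?_⟩
  unfold getCell
  rw [PySem.List.pyGet?_of_nonneg _ hi0, List.getElem?_eq_getElem hiN]
  simp only [Option.bind_some]
  rw [PySem.List.pyGet?_of_nonneg _ hj0, List.getElem?_eq_getElem hjN]
lemma min_possible (a : List (List String)) (i j mk p : Int) (cij : String)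
    (hc : getCell a i j = some cij) :
    PySem.List.min?
      ([(if cij = "#" then 1 else 0) + p]
        ++ (if 0 < j ∧ maskBit mk (j - 1) = 0 ∧ getCell a i (j - 1) = some cij ∧ cij = "#"
            then [p] else [])
        ++ (if 0 < i ∧ maskBit mk j = 1 ∧ getCell a (i - 1) j = some cij ∧ cij = "#"
            then [p] else [])) (fun x => x)
      = some (entryB a i j mk p) := by
  by_cases hsh : cij = "#"
  · subst hsh
    simp only [entryB, hc, and_true]
    by_cases h1 : 0 < j ∧ maskBit mk (j - 1) = 0 ∧ getCell a i (j - 1) = some "#" <;>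
      by_cases h2 : 0 < i ∧ maskBit mk j = 1 ∧ getCell a (i - 1) j = some "#" <;>
        simp [h1, h2, PySem.List.min?_id_cons] <;> omega
  · have hb : ¬ getCell a i j = some "#" := by rw [hc]; simp [hsh]
    simp [hsh, entryB, hb, PySem.List.min?_id_cons]
lemma helperA_lookup (a : List (List String)) (n m : Int)
    (hn : 1 ≤ n) (hm : 1 ≤ m)
    (hlen : n.toNat ≤ a.length) (hrow : ∀ row ∈ a.take n.toNat, m.toNat ≤ row.length)
    (fuel : Nat) (k : Nat) (hk : k < n.toNat * m.toNat) (cache : CacheA)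
    (hc : 1 ≤ k → cache.get? (ci m k, cj m k) = some (vecB a m k))
    (mk : Int) (h0 : 0 ≤ mk) (h1 : mk < (sz m : Nat)) :
    helperA a m (fuel + 1) (ci m k) (cj m k) (some mk) cache
      = some ((PySem.List.pyGet? (vecB a m k) mk).getD 0, cache) := by
  cases k with
  | zero =>
      obtain ⟨s, hs⟩ := getCell_some a n m hlen hrow 0 0 (by omega) (by omega) (by omega) (by omega)
      simp only [helperA, ci, cj, Nat.zero_div, Nat.zero_mod, Nat.cast_zero, and_self, if_pos, hs,
        Option.map_some]
      have hbase : (PySem.List.pyGet? (vecB a m 0) mk).getD 0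
          = (if getCell a 0 0 = some "." then 0 else 1 : Int) := by
        rw [PySem.List.pyGet?_of_nonneg _ h0]
        have hlt : mk.toNat < (vecB a m 0).length := by rw [len_vecB]; omega
        have hlt' : mk.toNat < sz m := by simpa [len_vecB] using hlt
        simp [vecB, hlt']
      rw [hbase, hs]
      simp
  | succ t =>
      have hne := cell_nonzero m (t + 1) (by omega)
      simp only [helperA, if_neg hne]
      rw [hc (by omega), Option.bind_some, pyGet?_vecB a m (t+1) mk h0 h1]
      simp
lemma foldA_inv (a : List (List String)) (n m : Int)
    (hn : 1 ≤ n) (hm : 1 ≤ m)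
    (hlen : n.toNat ≤ a.length) (hrow : ∀ row ∈ a.take n.toNat, m.toNat ≤ row.length)
    (f : Nat) (k : Nat) (hk1 : k + 1 < n.toNat * m.toNat)
    (cache0 : CacheA)
    (hl : 1 ≤ k → cache0.get? (ci m k, cj m k) = some (vecB a m k)) :
    ∀ T : Nat, T ≤ sz m →
    ∃ c, (PySem.List.pyRange 0 (T : Int) 1).foldl
      (fun (st : Option CacheA) mk =>
        st.bind fun cache =>
        (helperA a m (f + 1) (ci m k) (cj m k) (some mk) cache).bind fun v0 =>
        (getCell a (ci m (k+1)) (cj m (k+1))).bind fun cij =>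
        let possible : List Int := [(if cij = "#" then 1 else 0) + v0.1]
        let possible := possible ++
          (if 0 < cj m (k+1) ∧ maskBit mk (cj m (k+1) - 1) = 0 ∧
              getCell a (ci m (k+1)) (cj m (k+1) - 1) = some cij ∧ cij = "#"
           then [v0.1] else [])
        let possible := possible ++
          (if 0 < ci m (k+1) ∧ maskBit mk (cj m (k+1)) = 1 ∧
              getCell a (ci m (k+1) - 1) (cj m (k+1)) = some cij ∧ cij = "#"
           then [v0.1] else [])
        (PySem.List.min? possible (fun x => x)).map fun mn =>
          cache.insert (ci m (k+1), cj m (k+1))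
            (cache.getD (ci m (k+1), cj m (k+1)) [] ++ [mn]))
      (some (cache0.insert (ci m (k+1), cj m (k+1)) [])) = some c
     ∧ c.get? (ci m (k+1), cj m (k+1)) = some ((PySem.List.pyRange 0 (T : Int) 1).map
          (fun mk => entryB a (ci m (k+1)) (cj m (k+1)) mk
            ((PySem.List.pyGet? (vecB a m k) mk).getD 0)))
     ∧ (1 ≤ k → c.get? (ci m k, cj m k) = some (vecB a m k)) := by
  intro T
  induction T with
  | zero =>
      intro _
      refine ⟨cache0.insert (ci m (k+1), cj m (k+1)) [], ?_, ?_, ?_⟩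
      · simp [PySem.List.pyRange_one_eq_nil]
      · simp [PySem.Dict.get?_insert_self]
      · intro hk1'
        rw [PySem.Dict.get?_insert_of_ne _ _ (Ne.symm (cell_ne_succ m k))]
        exact hl hk1'
  | succ T ih =>
      intro hT
      obtain ⟨c, hfold, hrowc, hpres⟩ := ih (by omega)
      have hrange : PySem.List.pyRange 0 ((T + 1 : Nat) : Int) 1
          = PySem.List.pyRange 0 (T : Int) 1 ++ [(T : Int)] := by
        push_cast
        exact PySem.List.pyRange_one_succ_right (by omega)
      obtain ⟨cb, hcb⟩ := cell_bound m n.toNat (k+1) hm hk1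
      have hciN : ci m (k+1) < n := by
        simp only [ci]; generalize hg : (k+1) / m.toNat = q at cb ⊢; omega
      have hcjM : cj m (k+1) < m := by
        simp only [cj]; generalize hg : (k+1) % m.toNat = r at hcb ⊢; omega
      obtain ⟨cij, hcij⟩ := getCell_some a n m hlen hrow (ci m (k+1)) (cj m (k+1))
        (Int.natCast_nonneg _) hciN (Int.natCast_nonneg _) hcjM
      have hlook := helperA_lookup a n m hn hm hlen hrow f k (by omega) c hpres
        (T : Int) (by omega) (by omega)
      refine ⟨c.insert (ci m (k+1), cj m (k+1))
        ((PySem.List.pyRange 0 (T : Int) 1).map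
          (fun mk => entryB a (ci m (k+1)) (cj m (k+1)) mk
            ((PySem.List.pyGet? (vecB a m k) mk).getD 0)) ++
         [entryB a (ci m (k+1)) (cj m (k+1)) (T : Int)
            ((PySem.List.pyGet? (vecB a m k) (T : Int)).getD 0)]), ?_, ?_, ?_⟩
      · rw [hrange, List.foldl_append, hfold]
        simp only [List.foldl_cons, List.foldl_nil, Option.bind_some]
        rw [hlook]
        simp only [Option.bind_some]
        rw [hcij]
        simp only [Option.bind_some]
        rw [min_possible a (ci m (k+1)) (cj m (k+1)) (T : Int) _ cij hcij]
        simp only [Option.map_some]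
        rw [PySem.Dict.getD_of_get?_eq_some _ _ hrowc]
      · rw [PySem.Dict.get?_insert_self, hrange]
        simp
      · intro hk1'
        rw [PySem.Dict.get?_insert_of_ne _ _ (Ne.symm (cell_ne_succ m k))]
        exact hpres hk1'
lemma vecB_succ_eq (a : List (List String)) (m : Int) (t : Nat) :
    ((PySem.List.pyRange 0 ((sz m : Nat) : Int) 1).map
      (fun mk => entryB a (ci m (t+1)) (cj m (t+1)) mk
        ((PySem.List.pyGet? (vecB a m t) mk).getD 0))) = vecB a m (t+1) := by
  rw [sz_cast]
  rfl

lemma vecB_ne_nil (a : List (List String)) (m : Int) (k : Nat) : vecB a m k ≠ [] := by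
  intro h
  have h1 := len_vecB a m k
  rw [h] at h1
  have h2 : 0 < sz m := Nat.two_pow_pos m.toNat
  simp at h1
  omega

lemma helperA_succ (a : List (List String)) (m : Int) (fuel : Nat) (i j : Int)
    (mask : Option Int) (cache : CacheA) :
    helperA a m (fuel + 1) i j mask cache =
    (if i = 0 ∧ j = 0 then
      (getCell a i j).map (fun c => (if c = "." then 0 else 1, cache))
    else
      match mask with
      | some mk =>
          ((cache.get? (i, j)).bind (fun row => PySem.List.pyGet? row mk)).map
            (fun v => (v, cache))
      | none =>
          (if 0 < j then some (i, j - 1) else if 0 < i then some (i - 1, m - 1) else none).bind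
            fun last =>
          (helperA a m fuel last.1 last.2 none cache).bind fun pr =>
          ((PySem.List.pyRange 0 ((2 : Int) ^ m.toNat) 1).foldl
            (fun (st : Option CacheA) mk =>
              st.bind fun cache =>
              (helperA a m fuel last.1 last.2 (some mk) cache).bind fun v0 =>
              (getCell a i j).bind fun cij =>
              let possible : List Int := [(if cij = "#" then 1 else 0) + v0.1]
              let possible := possible ++
                (if 0 < j ∧ maskBit mk (j - 1) = 0 ∧ getCell a i (j - 1) = some cij ∧ cij = "#"
                 then [v0.1] else [])
              let possible := possible ++
                (if 0 < i ∧ maskBit mk j = 1 ∧ getCell a (i - 1) j = some cij ∧ cij = "#"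
                 then [v0.1] else [])
              (PySem.List.min? possible (fun x => x)).map fun mn =>
                cache.insert (i, j) (cache.getD (i, j) [] ++ [mn]))
            (some (pr.2.insert (i, j) []))).bind fun cache =>
          (cache.get? (i, j)).bind fun row =>
          (PySem.List.min? row (fun x => x)).map fun mn => (mn, cache)) := rfl

lemma helperA_main (a : List (List String)) (n m : Int)
    (hn : 1 ≤ n) (hm : 1 ≤ m)
    (hlen : n.toNat ≤ a.length) (hrow : ∀ row ∈ a.take n.toNat, m.toNat ≤ row.length) :
    ∀ k : Nat, k < n.toNat * m.toNat → 1 ≤ k → ∀ fuel : Nat, k + 1 ≤ fuel → ∀ cache : CacheA,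
    ∃ v c', helperA a m fuel (ci m k) (cj m k) none cache = some (v, c')
      ∧ c'.get? (ci m k, cj m k) = some (vecB a m k) := by
  intro k
  induction k with
  | zero => intro _ h1; omega
  | succ t ih =>
      intro hk _ fuel hf cache
      obtain ⟨g, rfl⟩ : ∃ g, fuel = g + 1 + 1 := ⟨fuel - 2, by omega⟩
      have hne := cell_nonzero m (t + 1) (by omega)
      have hlast : (if 0 < cj m (t+1) then some (ci m (t+1), cj m (t+1) - 1)
          else if 0 < ci m (t+1) then some (ci m (t+1) - 1, m - 1) else none)
          = some (ci m t, cj m t) := by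
        by_cases hcj : 0 < cj m (t+1)
        · obtain ⟨e1, e2⟩ := cell_pred_pos m hm t hcj
          rw [if_pos hcj, e1, e2]
        · have hcj0 : cj m (t+1) = 0 := by
            have : (0:Int) ≤ cj m (t+1) := Int.natCast_nonneg _
            omega
          obtain ⟨e0, e1, e2⟩ := cell_pred_zero m hm t hcj0
          rw [if_neg hcj, if_pos e0, e1, e2]
      have hrec : ∃ v1 c1, helperA a m (g+1) (ci m t) (cj m t) none cache = some (v1, c1)
          ∧ (1 ≤ t → c1.get? (ci m t, cj m t) = some (vecB a m t)) := by
        cases t with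
        | zero =>
            obtain ⟨s, hs⟩ := getCell_some a n m hlen hrow 0 0 (by omega) (by omega)
              (by omega) (by omega)
            refine ⟨(if s = "." then 0 else 1 : Int), cache, ?_, fun h => absurd h (by omega)⟩
            simp only [helperA, ci, cj, Nat.zero_div, Nat.zero_mod, Nat.cast_zero, and_self,
              if_pos, hs, Option.map_some]
        | succ u =>
            obtain ⟨v1, c1, h1, h2⟩ := ih (by omega) (by omega) (g+1) (by omega) cache
            exact ⟨v1, c1, h1, fun _ => h2⟩
      obtain ⟨v1, c1, hc1, hc1l⟩ := hrec
      obtain ⟨c, hfold, hrowc, -⟩ := foldA_inv a n m hn hm hlen hrow g t hk c1 hc1l (sz m) le_rfl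
      rw [vecB_succ_eq] at hrowc
      obtain ⟨w, hw⟩ : ∃ w, PySem.List.min? (vecB a m (t+1)) (fun x => x) = some w := by
        cases hv : vecB a m (t+1) with
        | nil => exact absurd hv (vecB_ne_nil a m (t+1))
        | cons x xs => exact ⟨xs.foldl min x, by simp [PySem.List.min?_id_cons]⟩
      refine ⟨w, c, ?_, hrowc⟩
      rw [helperA_succ, if_neg hne]
      rw [hlast]
      simp only [Option.bind_some]
      rw [hc1]
      simp only [Option.bind_some]
      rw [← sz_cast m]
      rw [hfold]
      simp only [Option.bind_some]
      rw [hrowc, Option.bind_some, hw]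
      simp
lemma foldB2 (a : List (List String)) (m : Int) (hm : 1 ≤ m) :
    ∀ T : Nat,
    (PySem.List.pyRange 0 ((T + 1 : Nat) : Int) 1).foldl
      (fun (prev : Option (List Int)) k =>
        some ((PySem.List.pyRange 0 ((2 : Int) ^ m.toNat) 1).map fun mk =>
          if k = 0 then
            (if getCell a (PySem.Int.floordiv k m) (PySem.Int.mod k m) = some "." then 0 else 1)
          else entryB a (PySem.Int.floordiv k m) (PySem.Int.mod k m) mk
            ((PySem.List.pyGet? (prev.getD []) mk).getD 0)))
      none
    = some (vecB a m T) := by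
  have hmm : m = ((m.toNat : Nat) : Int) := (Int.toNat_of_nonneg (by omega)).symm
  intro T
  induction T with
  | zero =>
      rw [show ((0 + 1 : Nat) : Int) = 0 + 1 by norm_num, PySem.List.pyRange_one_singleton]
      have h0d : PySem.Int.floordiv 0 m = 0 := by
        rw [PySem.Int.floordiv_eq_ediv_of_pos (by omega)]; simp
      have h0m : PySem.Int.mod 0 m = 0 := by
        rw [PySem.Int.mod_eq_emod_of_pos (by omega)]; simp
      simp only [List.foldl_cons, List.foldl_nil, if_true, h0d, h0m]
      congr 1
      have hlen : (PySem.List.pyRange 0 ((2 : Int) ^ m.toNat) 1).length = sz m := by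
        rw [PySem.List.length_pyRange_one, Int.sub_zero, ← sz_cast m, Int.toNat_natCast]
      rw [List.map_const', hlen]
      rfl
  | succ T ih =>
      have hrange : PySem.List.pyRange 0 ((T + 1 + 1 : Nat) : Int) 1
          = PySem.List.pyRange 0 ((T + 1 : Nat) : Int) 1 ++ [((T + 1 : Nat) : Int)] := by
        push_cast
        exact PySem.List.pyRange_one_succ_right (by omega)
      rw [hrange, List.foldl_append, ih]
      simp only [List.foldl_cons, List.foldl_nil, Option.getD_some]
      have hk0 : ¬ ((T + 1 : Nat) : Int) = 0 := by rw [Int.natCast_eq_zero]; omega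
      have hdiv : PySem.Int.floordiv ((T + 1 : Nat) : Int) m = ci m (T + 1) := by
        rw [hmm, PySem.Int.floordiv_natCast]; rfl
      have hmod : PySem.Int.mod ((T + 1 : Nat) : Int) m = cj m (T + 1) := by
        rw [hmm, PySem.Int.mod_natCast]; rfl
      simp only [if_neg hk0, hdiv, hmod]
      rfl

lemma last_cell (n m : Int) (hn : 1 ≤ n) (hm : 1 ≤ m) :
    ci m (n.toNat * m.toNat - 1) = n - 1 ∧ cj m (n.toNat * m.toNat - 1) = m - 1 := by
  have hM : 0 < m.toNat := by omega
  have hN : 0 < n.toNat := by omega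
  have hms : m.toNat * (n.toNat - 1) = m.toNat * n.toNat - m.toNat := by
    rw [Nat.mul_sub, Nat.mul_one]
  have hge : m.toNat ≤ m.toNat * n.toNat := Nat.le_mul_of_pos_right _ hN
  have hc : n.toNat * m.toNat = m.toNat * n.toNat := Nat.mul_comm _ _
  have hu := divmod_unique (b := m.toNat) (q := n.toNat - 1) (r := m.toNat - 1)
    (k := n.toNat * m.toNat - 1) hM (by omega) (by omega)
  constructor
  · simp only [ci, hu.1]; omega
  · simp only [cj, hu.2]; omega
lemma solution_eq_alt (n : Int) (m : Int) (a : List (List String))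
    (hpre : (1 ≤ n ∧ 1 ≤ m ∧ (2 ≤ n ∨ 2 ≤ m) ∧ n.toNat ≤ a.length ∧
      ∀ row ∈ a.take n.toNat, m.toNat ≤ row.length)) :
    solution n m a = solution_alt n m a := by
  obtain ⟨hn, hm, h2, hlen, hrow⟩ := hpre
  have hNM : 2 ≤ n.toNat * m.toNat := by
    rcases h2 with h2 | h2
    · calc 2 = 2 * 1 := by omega
        _ ≤ n.toNat * m.toNat := Nat.mul_le_mul (by omega) (by omega)
    · calc 2 = 1 * 2 := by omega
        _ ≤ n.toNat * m.toNat := Nat.mul_le_mul (by omega) (by omega)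
  obtain ⟨lc1, lc2⟩ := last_cell n m hn hm
  obtain ⟨v, c', hA, hget⟩ := helperA_main a n m hn hm hlen hrow (n.toNat * m.toNat - 1)
    (by omega) (by omega) (n.toNat * m.toNat + 1) (by omega) PySem.Dict.empty
  have hB : solution_alt n m a
      = (PySem.List.min? (vecB a m (n.toNat * m.toNat - 1)) (fun x => x)).getD 0 := by
    simp only [solution_alt]
    have hnm : n * m = ((n.toNat * m.toNat - 1 + 1 : Nat) : Int) := by
      rw [Nat.sub_add_cancel (by omega : 1 ≤ n.toNat * m.toNat)]
      push_cast
      rw [Int.toNat_of_nonneg (by omega : (0:Int) ≤ n),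
        Int.toNat_of_nonneg (by omega : (0:Int) ≤ m)]
    rw [hnm, foldB2 a m hm (n.toNat * m.toNat - 1)]
    rfl
  rw [hB]
  simp only [solution]
  rw [← lc1, ← lc2, hA]
  simp only [Option.bind_some]
  rw [hget]
  simp only [Option.bind_some]

-- ===== VERDICT (by name: the statement is the Claim_ definition above) =====
theorem solution_spec : Claim_equal_solution := by
  intro n m a _ hpre
  show solution n m a = solution_alt n m a
  exact solution_eq_alt n m a hpre
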